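-- pv_equiv track=rewrite | github.com/Samuel1043/mirtarsite | utils_annotate.py | add_mock_id
-- ===== SOURCE A (Python) =====
-- def add_mock_id(mirnas):
--     '''
--     add mock id for site level microRNA data
--     '''
--     tmp=[]
--     cnt=0
--     prev_id=''
--     for mirna in mirnas:
--         if(mirna!=prev_id):
--             cnt=0
--         mirid=mirna+'_'+str(cnt)
--         tmp.append(mirid)
--         prev_id=mirna
--         cnt+=1
--     return tmp
-- ===== SOURCE B (Python) =====
-- def add_mock_id(mirnas):
--     '''
--     add mock id for site level microRNA data
--     '''
--     n = len(mirnas)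
--     starts = [i for i in range(n) if i == 0 or mirnas[i] != mirnas[i - 1]]
--     ends = starts[1:] + [n]
--     out = []
--     for s, e in zip(starts, ends):
--         for k in range(e - s):
--             out.append(mirnas[s] + '_' + str(k))
--     return out
-- ===== Notes on version B (the rewrite author's own statement) =====
-- stated objective: alternative
-- what changed: B removes A's streaming prev_id/cnt state: it first computes the list of run-boundary indices by comparing adjacent positions, pairs each boundary with the next one, and generates each run's labels arithmetically from the (start, end) index pairs.
import Mathlib
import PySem

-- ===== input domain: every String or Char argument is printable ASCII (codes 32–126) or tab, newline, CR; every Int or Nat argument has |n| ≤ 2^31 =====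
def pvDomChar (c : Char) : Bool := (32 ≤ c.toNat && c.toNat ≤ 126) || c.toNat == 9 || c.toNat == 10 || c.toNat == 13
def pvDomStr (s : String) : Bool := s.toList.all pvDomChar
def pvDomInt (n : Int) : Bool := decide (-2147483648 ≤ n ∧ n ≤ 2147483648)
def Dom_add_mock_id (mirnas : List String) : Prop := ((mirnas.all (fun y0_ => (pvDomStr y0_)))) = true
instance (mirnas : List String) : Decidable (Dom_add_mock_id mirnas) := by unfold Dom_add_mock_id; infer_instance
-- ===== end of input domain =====

-- B drops A's streaming prev/cnt state entirely: it first computes the run-boundary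
-- index list by comparing adjacent positions, then emits each run's labels
-- arithmetically from the (start, end) index pairs. (alternative decomposition)

-- ===== PORT A =====
def add_mock_id (mirnas : List String) : List String :=
  (mirnas.foldl
    (fun (s : List String × Int × String) mirna =>
      let cnt : Int := if mirna ≠ s.2.2 then 0 else s.2.1
      let mirid := mirna ++ "_" ++ PySem.Int.toStr cnt
      (s.1 ++ [mirid], cnt + 1, mirna))
    ([], 0, "")).1

-- ===== PORT B =====
def add_mock_id_alt (mirnas : List String) : List String :=
  let n : Int := mirnas.length
  let starts : List Int := (PySem.List.pyRange 0 n 1).filter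
    (fun i => i == 0 || PySem.List.pyGet? mirnas i != PySem.List.pyGet? mirnas (i - 1))
  let ends : List Int := starts.drop 1 ++ [n]
  (starts.zip ends).foldl
    (fun out p =>
      (PySem.List.pyRange 0 (p.2 - p.1) 1).foldl
        (fun out2 k =>
          out2 ++ [(PySem.List.pyGet? mirnas p.1).getD "" ++ "_" ++ PySem.Int.toStr k])
        out)
    []

-- ===== PRECONDITION & SPEC =====
def Spec_add_mock_id (mirnas : List String) (out : List String) : Prop := out = add_mock_id_alt mirnas
instance (mirnas : List String) (out : List String) : Decidable (Spec_add_mock_id mirnas out) := by unfold Spec_add_mock_id; infer_instance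

-- ===== CLAIM (what is proved, stated in full; the proofs are below) =====
def Claim_equal_add_mock_id : Prop := ∀ (mirnas : List String), Dom_add_mock_id mirnas → Spec_add_mock_id mirnas (add_mock_id mirnas)

-- ===== LEMMAS AND PROOFS =====

-- A's loop, written as a recursion on the list (same state: cnt, prev)
def loopA : List String → Int → String → List String
  | [], _, _ => []
  | m :: ms, cnt, prev =>
    let c : Int := if m ≠ prev then 0 else cnt
    (m ++ "_" ++ PySem.Int.toStr c) :: loopA ms (c + 1) m

theorem foldl_eq_loopA (ms : List String) :
    ∀ (acc : List String) (cnt : Int) (prev : String),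
    (ms.foldl
      (fun (s : List String × Int × String) mirna =>
        let c : Int := if mirna ≠ s.2.2 then 0 else s.2.1
        let mirid := mirna ++ "_" ++ PySem.Int.toStr c
        (s.1 ++ [mirid], c + 1, mirna))
      (acc, cnt, prev)).1 = acc ++ loopA ms cnt prev := by
  induction ms with
  | nil => intro acc cnt prev; simp [loopA]
  | cons m ms ih =>
    intro acc cnt prev
    simp only [List.foldl_cons, loopA]
    rw [ih]
    simp

-- pvTakeRun k ys = the leading run of elements equal to k, and the rest
def pvTakeRun (k : String) : List String → List String × List String
  | [] => ([], [])
  | y :: ys =>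
    if y = k then
      let p := pvTakeRun k ys
      (y :: p.1, p.2)
    else ([], y :: ys)

theorem pvTakeRun_snd_length (k : String) (ys : List String) :
    (pvTakeRun k ys).2.length ≤ ys.length := by
  induction ys with
  | nil => simp [pvTakeRun]
  | cons y ys ih =>
    simp only [pvTakeRun]
    split
    · exact Nat.le_succ_of_le ih
    · simp

theorem pvTakeRun_append (k : String) (ys : List String) :
    (pvTakeRun k ys).1 ++ (pvTakeRun k ys).2 = ys := by
  induction ys with
  | nil => simp [pvTakeRun]
  | cons y ys ih =>
    simp only [pvTakeRun]
    split
    · simpa using ih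
    · simp

theorem pvTakeRun_run (k : String) (ys : List String) :
    (pvTakeRun k ys).1 = List.replicate (pvTakeRun k ys).1.length k := by
  induction ys with
  | nil => simp [pvTakeRun]
  | cons y ys ih =>
    simp only [pvTakeRun]
    split
    · rename_i h
      simp [List.replicate_succ, h]
      exact ih
    · simp

theorem pvTakeRun_rest_head (k : String) (ys : List String) :
    (pvTakeRun k ys).2.head? ≠ some k := by
  induction ys with
  | nil => simp [pvTakeRun]
  | cons y ys ih =>
    simp only [pvTakeRun]
    split
    · exact ih
    · rename_i h; simpa using h

-- the per-run recursion both ports are reduced to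
def runRec : List String → List String
  | [] => []
  | x :: xs =>
    let p := pvTakeRun x xs
    (PySem.List.enumerate (x :: p.1) 0).map (fun q => x ++ "_" ++ PySem.Int.toStr q.1)
      ++ runRec p.2
termination_by ms => ms.length
decreasing_by
  exact Nat.lt_succ_of_le (pvTakeRun_snd_length x xs)

theorem loopA_eq_runs (ms : List String) :
    ∀ (x : String) (k : Int),
    loopA ms k x =
      ((PySem.List.enumerate (pvTakeRun x ms).1 k).map
        (fun q => x ++ "_" ++ PySem.Int.toStr q.1))
      ++ runRec (pvTakeRun x ms).2 := by
  induction ms with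
  | nil => intro x k; simp [loopA, pvTakeRun, runRec]
  | cons m ms ih =>
    intro x k
    by_cases h : m = x
    · subst h
      simp only [loopA, pvTakeRun, ne_eq, not_true_eq_false, if_false]
      exact congrArg _ (ih m (k + 1))
    · have h' : (if m ≠ x then (0 : Int) else k) = 0 := if_pos h
      simp only [loopA, pvTakeRun, if_neg h, h']
      rw [show (0:Int)+1 = 1 from rfl, ih m 1]
      conv_rhs => rw [runRec]
      simp [PySem.List.enumerate_cons]

theorem a_eq_runRec (mirnas : List String) : add_mock_id mirnas = runRec mirnas := by
  unfold add_mock_id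
  rw [foldl_eq_loopA mirnas [] 0 "", List.nil_append]
  cases mirnas with
  | nil => simp [loopA, runRec]
  | cons m ms =>
    have h0 : (if m ≠ "" then (0 : Int) else 0) = 0 := by split <;> rfl
    simp only [loopA, h0]
    rw [show (0:Int)+1 = 1 from rfl, loopA_eq_runs ms m 1]
    conv_rhs => rw [runRec]
    simp [PySem.List.enumerate_cons]

-- ===== B-side lemmas =====

-- boundary condition and start list, named for the proofs
def pvCond (xs : List String) (i : Int) : Bool :=
  i == 0 || PySem.List.pyGet? xs i != PySem.List.pyGet? xs (i - 1)

def pvStarts (xs : List String) : List Int :=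
  (PySem.List.pyRange 0 (xs.length : Int) 1).filter (pvCond xs)

def pvSeg (xs : List String) (p : Int × Int) : List String :=
  (PySem.List.pyRange 0 (p.2 - p.1) 1).map
    (fun k => (PySem.List.pyGet? xs p.1).getD "" ++ "_" ++ PySem.Int.toStr k)

theorem alt_eq_segs (xs : List String) :
    add_mock_id_alt xs =
      ((pvStarts xs).zip ((pvStarts xs).drop 1 ++ [(xs.length : Int)])).flatMap (pvSeg xs) := by
  have key : ∀ (st : List (Int × Int)) (acc : List String),
      st.foldl
        (fun out p =>
          (PySem.List.pyRange 0 (p.2 - p.1) 1).foldl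
            (fun out2 k =>
              out2 ++ [(PySem.List.pyGet? xs p.1).getD "" ++ "_" ++ PySem.Int.toStr k])
            out)
        acc = acc ++ st.flatMap (pvSeg xs) := by
    intro st
    induction st with
    | nil => intro acc; simp
    | cons p st ih =>
      intro acc
      simp only [List.foldl_cons, List.flatMap_cons]
      rw [PySem.List.foldl_append_singleton_eq_map, ih]
      simp [pvSeg]
  unfold add_mock_id_alt
  rw [key]
  simp only [List.nil_append]
  rfl

theorem flatMap_congr_mem {α β : Type} (l : List α) (f g : α → List β)
    (h : ∀ a ∈ l, f a = g a) : l.flatMap f = l.flatMap g := by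
  induction l with
  | nil => simp
  | cons a l ih =>
    simp only [List.flatMap_cons]
    rw [h a (List.mem_cons_self), ih (fun b hb => h b (List.mem_cons_of_mem _ hb))]

theorem pyGet?_prefix {L : Nat} {x : String} {rest : List String} {i : Int}
    (h0 : 0 ≤ i) (h1 : i < (L : Int) + 1) :
    PySem.List.pyGet? (List.replicate (L + 1) x ++ rest) i = some x := by
  obtain ⟨k, rfl⟩ := Int.eq_ofNat_of_zero_le h0
  rw [PySem.List.pyGet?_natCast]
  have hk : k < L + 1 := by exact_mod_cast (by omega : (k : Int) < (L : Int) + 1)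
  rw [List.getElem?_append_left (by simpa using hk)]
  simp [hk]

theorem pyGet?_shift (pre rest : List String) (i : Int) (h0 : 0 ≤ i) :
    PySem.List.pyGet? (pre ++ rest) ((pre.length : Int) + i) = PySem.List.pyGet? rest i := by
  obtain ⟨k, rfl⟩ := Int.eq_ofNat_of_zero_le h0
  rw [show ((pre.length : Int) + (k : Int)) = ((pre.length + k : Nat) : Int) by push_cast; ring]
  rw [PySem.List.pyGet?_natCast, PySem.List.pyGet?_natCast]
  rw [List.getElem?_append_right (Nat.le_add_right _ _)]
  simp

theorem pyRange_shift (c r : Int) :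
    PySem.List.pyRange c (c + r) 1 = (PySem.List.pyRange 0 r 1).map (fun i => c + i) := by
  rw [PySem.List.pyRange_one, PySem.List.pyRange_one, List.map_map]
  rw [show c + r - c = r - 0 by ring]
  apply List.map_congr_left
  intro k _
  simp

theorem pvStarts_cons_zero (ys : List String) (h : ys ≠ []) :
    pvStarts ys = 0 :: (PySem.List.pyRange 1 (ys.length : Int) 1).filter (pvCond ys) := by
  unfold pvStarts
  rw [PySem.List.pyRange_one_cons (by exact_mod_cast List.length_pos_iff.mpr h)]
  rw [List.filter_cons_of_pos (by simp [pvCond])]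
  norm_num

theorem pvStarts_split (x : String) (L : Nat) (rest : List String)
    (hhead : rest.head? ≠ some x) :
    pvStarts (List.replicate (L + 1) x ++ rest)
      = 0 :: (pvStarts rest).map (fun i => ((L : Int) + 1) + i) := by
  set c : Int := (L : Int) + 1 with hc
  set xs := List.replicate (L + 1) x ++ rest with hxs
  have hlen : (xs.length : Int) = c + (rest.length : Int) := by
    have h' : xs.length = (L + 1) + rest.length := by simp [hxs]
    rw [h', hc]; push_cast; ring
  unfold pvStarts
  rw [hlen]
  rw [PySem.List.pyRange_one_append 0 c (c + (rest.length : Int)) (by omega)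
    (by have : (0 : Int) ≤ (rest.length : Int) := by positivity
        omega)]
  rw [List.filter_append]
  have hp1 : (PySem.List.pyRange 0 c 1).filter (pvCond xs) = [0] := by
    rw [PySem.List.pyRange_one_cons (by omega)]
    rw [List.filter_cons_of_pos (by simp [pvCond])]
    have hnil : (PySem.List.pyRange (0 + 1) c 1).filter (pvCond xs) = [] := by
      apply List.filter_eq_nil_iff.mpr
      intro i hi
      obtain ⟨hi0, hi1⟩ := PySem.List.mem_pyRange_one.mp hi
      have e1 : PySem.List.pyGet? xs i = some x := pyGet?_prefix (by omega) (by omega)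
      have e2 : PySem.List.pyGet? xs (i - 1) = some x := pyGet?_prefix (by omega) (by omega)
      simp [pvCond, e1, e2, show ¬ i = 0 by omega]
    rw [hnil]
  have hp2 : (PySem.List.pyRange c (c + (rest.length : Int)) 1).filter (pvCond xs)
      = ((PySem.List.pyRange 0 (rest.length : Int) 1).filter (pvCond rest)).map
          (fun i => c + i) := by
    rw [pyRange_shift, List.filter_map]
    congr 1
    apply List.filter_congr
    intro i hi
    obtain ⟨hi0, hi1⟩ := PySem.List.mem_pyRange_one.mp hi
    have hpre : ((List.replicate (L + 1) x).length : Int) = c := by simp [hc]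
    simp only [Function.comp_apply, pvCond]
    by_cases h0 : i = 0
    · subst h0
      simp only [add_zero]
      have e1 : PySem.List.pyGet? xs c = rest.head? := by
        rw [hxs, show c = ((List.replicate (L + 1) x).length : Int) + 0 by rw [hpre]; ring,
          pyGet?_shift _ _ _ le_rfl]
        cases rest <;> simp [PySem.List.pyGet?, PySem.List.pyIdx?]
      have e2 : PySem.List.pyGet? xs (c - 1) = some x :=
        pyGet?_prefix (by omega) (by omega)
      rw [e1, e2]
      rw [show ((0 : Int) == 0) = true from rfl]
      rw [show (rest.head? != some x) = true from bne_iff_ne.mpr hhead]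
      simp
    · have e1 : PySem.List.pyGet? xs (c + i) = PySem.List.pyGet? rest i := by
        rw [hxs, ← hpre]; exact pyGet?_shift _ _ _ hi0
      have e2 : PySem.List.pyGet? xs (c + i - 1) = PySem.List.pyGet? rest (i - 1) := by
        rw [show c + i - 1 = c + (i - 1) by ring, hxs, ← hpre]
        exact pyGet?_shift _ _ _ (by omega)
      rw [e1, e2, show ((c + i : Int) == 0) = false from beq_eq_false_iff_ne.mpr (by omega),
        show ((i : Int) == 0) = false from beq_eq_false_iff_ne.mpr h0]
  rw [hp1, hp2]
  rfl

theorem seg_first (x : String) (L : Nat) (rest : List String) :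
    pvSeg (List.replicate (L + 1) x ++ rest) (0, (L : Int) + 1)
      = (PySem.List.enumerate (List.replicate (L + 1) x) 0).map
          (fun q => x ++ "_" ++ PySem.Int.toStr q.1) := by
  rw [PySem.List.enumerate_eq_map_pyRange _ "", List.map_map]
  unfold pvSeg
  have e0 : (PySem.List.pyGet? (List.replicate (L + 1) x ++ rest) (0 : Int)).getD "" = x := by
    rw [pyGet?_prefix le_rfl (by omega)]
    rfl
  simp only [sub_zero, e0]
  have hlen1 : PySem.List.len (List.replicate (L + 1) x) = (L : Int) + 1 := by
    simp
  rw [hlen1]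
  simp [Function.comp]

theorem alt_empty : add_mock_id_alt [] = [] := by
  rw [alt_eq_segs]
  simp [pvStarts, PySem.List.pyRange_one_eq_nil le_rfl]

theorem alt_eq_runRec_aux : ∀ (n : Nat) (xs : List String),
    xs.length ≤ n → add_mock_id_alt xs = runRec xs := by
  intro n
  induction n with
  | zero =>
    intro xs h
    have hx : xs = [] := List.eq_nil_of_length_eq_zero (Nat.le_zero.mp h)
    rw [hx, alt_empty]
    simp [runRec]
  | succ n ih =>
    intro xs h
    match xs with
    | [] => rw [alt_empty]; simp [runRec]
    | x :: ys =>
      have hsplit : (pvTakeRun x ys).1 ++ (pvTakeRun x ys).2 = ys := pvTakeRun_append x ys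
      set L : Nat := (pvTakeRun x ys).1.length with hL
      set rest : List String := (pvTakeRun x ys).2 with hrest
      have hrun : x :: (pvTakeRun x ys).1 = List.replicate (L + 1) x := by
        rw [List.replicate_succ, ← pvTakeRun_run x ys]
      have hxs : x :: ys = List.replicate (L + 1) x ++ rest := by
        conv_lhs => rw [← hsplit]
        rw [← hrun]
        rfl
      have hhead : rest.head? ≠ some x := pvTakeRun_rest_head x ys
      have hrl : rest.length ≤ n := le_trans (pvTakeRun_snd_length x ys) (Nat.le_of_succ_le_succ h)
      set c : Int := (L : Int) + 1 with hc
      have hlen : (((List.replicate (L + 1) x ++ rest).length : Int)) = c + (rest.length : Int) := by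
        have h' : (List.replicate (L + 1) x ++ rest).length = (L + 1) + rest.length := by simp
        rw [h', hc]; push_cast; ring
      rw [alt_eq_segs, hxs, pvStarts_split x L rest hhead, hlen]
      have hfirst : runRec (List.replicate (L + 1) x ++ rest)
          = pvSeg (List.replicate (L + 1) x ++ rest) (0, c) ++ runRec rest := by
        conv_lhs => rw [← hxs, runRec]
        rw [hrun, ← seg_first x L rest]
      rw [hfirst]
      by_cases hre : rest = []
      · rw [hre]
        have hS : pvStarts ([] : List String) = [] := by
          simp [pvStarts, PySem.List.pyRange_one_eq_nil le_rfl]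
        rw [hS]
        simp [runRec]
      · obtain ⟨T, hT⟩ : ∃ T, pvStarts rest = 0 :: T :=
          ⟨_, pvStarts_cons_zero rest hre⟩
        rw [hT]
        simp only [List.map_cons, List.zip_cons_cons, List.cons_append, List.drop_succ_cons,
          List.drop_zero, List.flatMap_cons]
        have hpair : (((c + 0) :: T.map (fun i => c + i)).zip
              (T.map (fun i => c + i) ++ [c + (rest.length : Int)]))
            = (((0 :: T).zip ((0 :: T).drop 1 ++ [(rest.length : Int)])).map
                (Prod.map (fun i => c + i) (fun i => c + i))) := by
          rw [show ((c + 0) :: T.map (fun i => c + i)) = (0 :: T).map (fun i => c + i) by simp]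
          rw [show (T.map (fun i => c + i) ++ [c + (rest.length : Int)])
              = ((0 :: T).drop 1 ++ [(rest.length : Int)]).map (fun i => c + i) by simp]
          exact List.zip_map
        rw [hpair]
        have hmap : (((0 :: T).zip ((0 :: T).drop 1 ++ [(rest.length : Int)])).map
              (Prod.map (fun i => c + i) (fun i => c + i))).flatMap
              (pvSeg (List.replicate (L + 1) x ++ rest))
            = ((0 :: T).zip ((0 :: T).drop 1 ++ [(rest.length : Int)])).flatMap
              (pvSeg rest) := by
          rw [List.flatMap_map]
          apply flatMap_congr_mem
          intro p hp
          have ha : p.1 ∈ (0 :: T) := by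
            obtain ⟨a, b⟩ := p
            exact (List.of_mem_zip hp).1
          rw [← hT] at ha
          have ha0 : 0 ≤ p.1 := by
            have := List.mem_filter.mp ha
            exact (PySem.List.mem_pyRange_one.mp this.1).1
          show pvSeg _ (Prod.map _ _ p) = pvSeg rest p
          obtain ⟨a, b⟩ := p
          simp only [Prod.map, pvSeg]
          rw [show c + b - (c + a) = b - a by ring]
          have hpre : ((List.replicate (L + 1) x).length : Int) = c := by simp [hc]
          rw [show c + a = ((List.replicate (L + 1) x).length : Int) + a by rw [hpre]]
          rw [pyGet?_shift _ _ _ ha0]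
        rw [hmap]
        have : ((0 :: T).zip ((0 :: T).drop 1 ++ [(rest.length : Int)])).flatMap (pvSeg rest)
            = add_mock_id_alt rest := by
          rw [alt_eq_segs rest, hT]
        rw [show c + 0 = c by ring, this, ih rest hrl]

theorem alt_eq_runRec (xs : List String) : add_mock_id_alt xs = runRec xs :=
  alt_eq_runRec_aux xs.length xs le_rfl

-- ===== VERDICT (by name: the statement is the Claim_ definition above) =====
theorem add_mock_id_spec : Claim_equal_add_mock_id := by
  intro mirnas _
  show add_mock_id mirnas = add_mock_id_alt mirnas
  rw [a_eq_runRec, alt_eq_runRec]
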